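-- pv_equiv track=rewrite | github.com/perryrh0dan/qlock | qlock/utils.py | get_leds_xy
-- ===== SOURCE A (Python) =====
-- def get_leds_xy(x, y, length, direction):
--     leds = []
--
--     if length <= 0:
--         return leds
--
--     led = 0
--     if y % 2 == 0:
--         led = y * 11 + x
--     else:
--         led = (y + 1) * 11 - x - 1
--
--     if led <= 109:
--         leds.append(led)
--     else:
--         return leds
--
--     if direction == "y":
--         for i in range(length - 1):
--             led = 0
--             if (y + i) % 2 == 0:
--                 led = leds[i] + 21 - 2 * x
--             else:
--                 led = leds[i] + 21 - 2 * (10 - x)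
--
--             if led <= 109:
--                 leds.append(led)
--             else:
--                 break
--
--     leds = list(filter(lambda x: x >= 0, leds))
--     return leds
-- ===== SOURCE B (Python) =====
-- def get_leds_xy(x, y, length, direction):
--     if length <= 0:
--         return []
--     leds = []
--     count = length if direction == "y" else 1
--     for i in range(count):
--         row = y + i
--         led = row * 11 + x if row % 2 == 0 else (row + 1) * 11 - x - 1
--         if led > 109:
--             break
--         if led >= 0:
--             leds.append(led)
--     return leds
-- ===== Notes on version B (the rewrite author's own statement) =====
-- stated objective: simpler
-- what changed: Each LED index is computed directly from its row (row*11+x for even rows, (row+1)*11-x-1 for odd) in one uniform loop with the non-negativity filter folded in, replacing A's special-cased first element, the leds[i]-based linear recurrence with a parity branch, and the trailing filter pass.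
import Mathlib
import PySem

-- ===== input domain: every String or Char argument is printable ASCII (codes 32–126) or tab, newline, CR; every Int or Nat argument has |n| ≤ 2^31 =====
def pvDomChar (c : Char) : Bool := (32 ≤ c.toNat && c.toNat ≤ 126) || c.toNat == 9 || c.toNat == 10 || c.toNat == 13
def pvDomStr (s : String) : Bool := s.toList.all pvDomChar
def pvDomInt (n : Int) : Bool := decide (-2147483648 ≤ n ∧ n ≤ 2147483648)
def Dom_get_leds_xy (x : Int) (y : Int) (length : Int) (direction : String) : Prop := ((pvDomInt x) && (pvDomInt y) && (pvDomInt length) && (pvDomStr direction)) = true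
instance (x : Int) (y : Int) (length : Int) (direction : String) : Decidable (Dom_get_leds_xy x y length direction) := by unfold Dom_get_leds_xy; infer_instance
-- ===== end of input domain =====

-- B computes each LED directly from its row instead of A's leds[i]-based recurrence,
-- folding the first-element special case and the trailing non-negativity filter into one loop (objective: simpler).

-- ===== PORT A =====
-- loop body of A's 'for i in range(length - 1)'; the state is (leds, broken).
-- leds[i] is ported as pyGetD leds i 0: at iteration i the list always has i+1 elements,
-- so the index is in range and the default 0 is never taken (exact w.r.t. Python).
def pvStepA (x : Int) (y : Int) (st : List Int × Bool) (i : Int) : List Int × Bool :=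
  if st.2 then st
  else
    let led : Int :=
      if PySem.Int.mod (y + i) 2 = 0 then PySem.List.pyGetD st.1 i 0 + 21 - 2 * x
      else PySem.List.pyGetD st.1 i 0 + 21 - 2 * (10 - x)
    if led ≤ 109 then (st.1 ++ [led], false) else (st.1, true)

def get_leds_xy (x : Int) (y : Int) (length : Int) (direction : String) : List Int :=
  if length ≤ 0 then []
  else
    let led : Int := if PySem.Int.mod y 2 = 0 then y * 11 + x else (y + 1) * 11 - x - 1
    if led ≤ 109 then
      let leds : List Int := [led]
      let leds : List Int :=
        if direction == "y" then
          ((PySem.List.pyRange 0 (length - 1) 1).foldl (pvStepA x y) (leds, false)).1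
        else leds
      leds.filter (fun t => decide (t ≥ 0))
    else []

-- ===== PORT B =====
-- loop body of B's 'for i in range(count)'; the state is (leds, broken).
def pvStepB (x : Int) (y : Int) (st : List Int × Bool) (i : Int) : List Int × Bool :=
  if st.2 then st
  else
    let row : Int := y + i
    let led : Int := if PySem.Int.mod row 2 = 0 then row * 11 + x else (row + 1) * 11 - x - 1
    if led > 109 then (st.1, true)
    else if led ≥ 0 then (st.1 ++ [led], false) else (st.1, false)

def get_leds_xy_alt (x : Int) (y : Int) (length : Int) (direction : String) : List Int :=
  if length ≤ 0 then []
  else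
    let count : Int := if direction == "y" then length else 1
    ((PySem.List.pyRange 0 count 1).foldl (pvStepB x y) ([], false)).1

-- ===== PRECONDITION & SPEC =====
def Spec_get_leds_xy (x : Int) (y : Int) (length : Int) (direction : String) (out : List Int) : Prop := out = get_leds_xy_alt x y length direction
instance (x : Int) (y : Int) (length : Int) (direction : String) (out : List Int) : Decidable (Spec_get_leds_xy x y length direction out) := by unfold Spec_get_leds_xy; infer_instance

-- ===== CLAIM (what is proved, stated in full; the proofs are below) =====
def Claim_equal_get_leds_xy : Prop := ∀ (x : Int) (y : Int) (length : Int) (direction : String), Dom_get_leds_xy x y length direction → Spec_get_leds_xy x y length direction (get_leds_xy x y length direction)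

-- ===== LEMMAS AND PROOFS =====

-- the direct per-row LED formula
def pvF (x : Int) (row : Int) : Int :=
  if PySem.Int.mod row 2 = 0 then row * 11 + x else (row + 1) * 11 - x - 1

-- the unfiltered LED sequence: rows row, row+1, … cut off at the first led > 109
def pvChain (x : Int) (row : Int) : Nat → List Int
  | 0 => []
  | n + 1 => if pvF x row ≤ 109 then pvF x row :: pvChain x (row + 1) n else []

theorem pvF_step (x row : Int) :
    (if PySem.Int.mod row 2 = 0 then pvF x row + 21 - 2 * x else pvF x row + 21 - 2 * (10 - x))
      = pvF x (row + 1) := by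
  simp only [pvF, PySem.Int.mod_eq_emod_of_pos (a := row) (b := 2) (by omega),
    PySem.Int.mod_eq_emod_of_pos (a := row + 1) (b := 2) (by omega)]
  split_ifs <;> omega

theorem foldA_broken (x y : Int) (l : List Int) (acc : List Int) :
    l.foldl (pvStepA x y) (acc, true) = (acc, true) := by
  induction l with
  | nil => rfl
  | cons a l ih => simpa [pvStepA] using ih

theorem foldB_broken (x y : Int) (l : List Int) (acc : List Int) :
    l.foldl (pvStepB x y) (acc, true) = (acc, true) := by
  induction l with
  | nil => rfl
  | cons a l ih => simpa [pvStepB] using ih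

theorem foldA_inv (x y hi : Int) :
    ∀ (n : Nat) (i : Nat) (l : List Int), l.length = i → (hi - (i : Int)).toNat ≤ n →
    ((PySem.List.pyRange (i : Int) hi 1).foldl (pvStepA x y) (l ++ [pvF x (y + i)], false)).1
      = (l ++ [pvF x (y + i)]) ++ pvChain x (y + i + 1) (hi - (i : Int)).toNat := by
  intro n
  induction n with
  | zero =>
    intro i l hl hn
    have hle : hi ≤ (i : Int) := by omega
    rw [PySem.List.pyRange_one_eq_nil hle]
    have h0 : (hi - (i : Int)).toNat = 0 := by omega
    simp [h0, pvChain]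
  | succ n ih =>
    intro i l hl hn
    by_cases hlt : (i : Int) < hi
    · rw [PySem.List.pyRange_one_cons hlt]
      have hget : PySem.List.pyGetD (l ++ [pvF x (y + i)]) (i : Int) 0 = pvF x (y + i) := by
        rw [PySem.List.pyGetD_natCast]
        simp [List.getD, ← hl]
      have hstep : pvStepA x y (l ++ [pvF x (y + i)], false) (i : Int)
          = (if pvF x (y + (i : Int) + 1) ≤ 109
              then ((l ++ [pvF x (y + i)]) ++ [pvF x (y + (i : Int) + 1)], false)
              else (l ++ [pvF x (y + i)], true)) := by
        simp only [pvStepA, hget]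
        rw [show (if PySem.Int.mod (y + (i : Int)) 2 = 0 then pvF x (y + i) + 21 - 2 * x
              else pvF x (y + i) + 21 - 2 * (10 - x)) = pvF x (y + (i : Int) + 1) from
            pvF_step x (y + i)]
        simp
      have hsucc : (hi - (i : Int)).toNat = (hi - ((i : Int) + 1)).toNat + 1 := by omega
      rw [List.foldl_cons, hstep]
      by_cases hled : pvF x (y + (i : Int) + 1) ≤ 109
      · rw [if_pos hled]
        have hcast : ((i : Int) + 1) = ((i + 1 : Nat) : Int) := by push_cast; ring
        have := ih (i + 1) (l ++ [pvF x (y + i)]) (by simp [hl]) (by omega)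
        simp only [Nat.cast_add, Nat.cast_one, ← add_assoc] at this
        rw [this, hsucc, pvChain, if_pos hled]
        simp
      · rw [if_neg hled, foldA_broken]
        rw [hsucc, pvChain, if_neg hled]
        simp
    · rw [PySem.List.pyRange_one_eq_nil (by omega)]
      have h0 : (hi - (i : Int)).toNat = 0 := by omega
      simp [h0, pvChain]

theorem foldB_inv (x y cnt : Int) :
    ∀ (n : Nat) (i : Nat) (acc : List Int), (cnt - (i : Int)).toNat ≤ n →
    ((PySem.List.pyRange (i : Int) cnt 1).foldl (pvStepB x y) (acc, false)).1
      = acc ++ (pvChain x (y + i) (cnt - (i : Int)).toNat).filter (fun t => decide (t ≥ 0)) := by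
  intro n
  induction n with
  | zero =>
    intro i acc hn
    rw [PySem.List.pyRange_one_eq_nil (by omega)]
    have h0 : (cnt - (i : Int)).toNat = 0 := by omega
    simp [h0, pvChain]
  | succ n ih =>
    intro i acc hn
    by_cases hlt : (i : Int) < cnt
    · rw [PySem.List.pyRange_one_cons hlt]
      have hsucc : (cnt - (i : Int)).toNat = (cnt - ((i : Int) + 1)).toNat + 1 := by omega
      have hcast : ((i : Int) + 1) = ((i + 1 : Nat) : Int) := by push_cast; ring
      rw [List.foldl_cons]
      by_cases hbig : pvF x (y + i) > 109
      · have hstep : pvStepB x y (acc, false) (i : Int) = (acc, true) := by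
          simp only [pvStepB, pvF] at hbig ⊢
          rw [if_neg (by simp), if_pos hbig]
        rw [hstep, foldB_broken, hsucc, pvChain, if_neg (by omega)]
        simp
      · have hle : pvF x (y + i) ≤ 109 := by omega
        rw [hsucc, pvChain, if_pos hle]
        by_cases hpos : pvF x (y + i) ≥ 0
        · have hstep : pvStepB x y (acc, false) (i : Int) = (acc ++ [pvF x (y + i)], false) := by
            simp only [pvStepB, pvF] at hbig hpos ⊢
            rw [if_neg (by simp), if_neg hbig, if_pos hpos]
          rw [hstep, hcast, ih (i + 1) _ (by omega)]
          rw [show (y + ((i + 1 : Nat) : Int)) = y + (i : Int) + 1 by push_cast; ring]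
          simp [List.filter, hpos]
        · have hstep : pvStepB x y (acc, false) (i : Int) = (acc, false) := by
            simp only [pvStepB, pvF] at hbig hpos ⊢
            rw [if_neg (by simp), if_neg hbig, if_neg hpos]
          rw [hstep, hcast, ih (i + 1) _ (by omega)]
          rw [show (y + ((i + 1 : Nat) : Int)) = y + (i : Int) + 1 by push_cast; ring]
          simp [List.filter, hpos]
    · rw [PySem.List.pyRange_one_eq_nil (by omega)]
      have h0 : (cnt - (i : Int)).toNat = 0 := by omega
      simp [h0, pvChain]

-- B's whole body, for length > 0, in terms of pvChain
theorem altB_eq (x y cnt : Int) (hcnt : 0 ≤ cnt) :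
    ((PySem.List.pyRange 0 cnt 1).foldl (pvStepB x y) ([], false)).1
      = (pvChain x y cnt.toNat).filter (fun t => decide (t ≥ 0)) := by
  have := foldB_inv x y cnt cnt.toNat 0 [] (by omega)
  simpa using this

-- ===== VERDICT (by name: the statement is the Claim_ definition above) =====
theorem get_leds_xy_spec : Claim_equal_get_leds_xy := by
  unfold Claim_equal_get_leds_xy
  intro x y length direction _
  unfold Spec_get_leds_xy get_leds_xy get_leds_xy_alt
  by_cases hlen : length ≤ 0
  · simp [hlen]
  · rw [if_neg hlen, if_neg hlen]
    have hF0 : (if PySem.Int.mod y 2 = 0 then y * 11 + x else (y + 1) * 11 - x - 1) = pvF x y := rfl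
    rw [hF0]
    by_cases hd : (direction == "y") = true
    · have hB := altB_eq x y length (by omega)
      have hsucc : length.toNat = (length - 1).toNat + 1 := by omega
      rw [hsucc, pvChain] at hB
      have hA0 := foldA_inv x y (length - 1) (length - 1).toNat 0 [] rfl (by omega)
      simp only [Nat.cast_zero, add_zero, List.nil_append, Int.sub_zero] at hA0
      by_cases hled : pvF x y ≤ 109
      · rw [if_pos hled] at hB
        simp [hd, hled, hA0, hB]
      · rw [if_neg hled] at hB
        simp [hd, hled, hB]
    · have hB := altB_eq x y 1 (by omega)
      rw [show (1 : Int).toNat = 1 from rfl, pvChain] at hB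
      by_cases hled : pvF x y ≤ 109
      · rw [if_pos hled] at hB
        simp [hd, hled, hB, pvChain]
      · rw [if_neg hled] at hB
        simp [hd, hled, hB]
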